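-- pv_equiv track=rewrite | github.com/Akitsuyoshi/try_python_container | src/excercises.py | is_any_odd
-- ===== SOURCE A (Python) =====
-- from typing import Any, List, Sequence, Tuple
--
-- def is_even(k: int) -> bool:
--     return k % 2 == 0
--
-- def is_any_odd(data: Sequence[int]) -> bool:
--     # odd * odd = odd, odd * even = even, even * even = even
--     odd_nums = set()
--     for i in data:
--         if not is_even(i):
--             odd_nums.add(i)
--         if len(odd_nums) >= 2:
--             return True
--     return False
-- ===== SOURCE B (Python) =====
-- def is_any_odd(data):
--     odds = [i for i in data if i % 2 != 0]
--     return bool(odds) and min(odds) != max(odds)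
-- ===== Notes on version B (the rewrite author's own statement) =====
-- stated objective: simpler
-- what changed: Replaces the stateful early-exit scan over a growing set with a stateless two-stage pipeline: filter out the odd values, then decide distinctness by comparing min and max of that list.
import Mathlib
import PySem

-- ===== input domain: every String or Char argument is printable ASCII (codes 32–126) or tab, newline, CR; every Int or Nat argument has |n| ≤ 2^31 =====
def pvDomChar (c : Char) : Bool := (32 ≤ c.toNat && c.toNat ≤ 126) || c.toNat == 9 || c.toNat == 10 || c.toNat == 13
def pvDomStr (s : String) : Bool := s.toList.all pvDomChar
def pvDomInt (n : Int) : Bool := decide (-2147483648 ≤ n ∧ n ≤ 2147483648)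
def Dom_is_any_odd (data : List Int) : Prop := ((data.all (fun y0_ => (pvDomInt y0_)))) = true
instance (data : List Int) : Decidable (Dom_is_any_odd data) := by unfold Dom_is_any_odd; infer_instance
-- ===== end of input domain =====

-- B replaces A's stateful early-exit set scan with a stateless pipeline: filter the odd values, then compare min and max; simpler, same cost.


-- ===== PORT A =====
def is_even (k : Int) : Bool := PySem.Int.mod k 2 == 0

def isAnyOddLoopA : List Int → PySem.Set Int → Bool
  | [], _ => false
  | i :: rest, odd_nums =>
    let odd_nums' := if !(is_even i) then PySem.Set.add odd_nums i else odd_nums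
    if 2 ≤ PySem.Set.len odd_nums' then true else isAnyOddLoopA rest odd_nums'

def is_any_odd (data : List Int) : Bool := isAnyOddLoopA data PySem.Set.empty

-- ===== PORT B =====
def is_any_odd_alt (data : List Int) : Bool :=
  let odds := data.filter (fun i => PySem.Int.mod i 2 != 0)
  !odds.isEmpty && decide (PySem.List.min? odds (fun x => x) ≠ PySem.List.max? odds (fun x => x))

-- ===== PRECONDITION & SPEC =====
def Spec_is_any_odd (data : List Int) (out : Bool) : Prop := out = is_any_odd_alt data
instance (data : List Int) (out : Bool) : Decidable (Spec_is_any_odd data out) := by unfold Spec_is_any_odd; infer_instance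

-- ===== CLAIM (what is proved, stated in full; the proofs are below) =====
def Claim_equal_is_any_odd : Prop := ∀ (data : List Int), Dom_is_any_odd data → Spec_is_any_odd data (is_any_odd data)

-- ===== LEMMAS AND PROOFS =====

-- both sides are characterised by: data contains two distinct odd values
def twoOdds (data : List Int) : Prop :=
  ∃ a ∈ data, a % 2 = 1 ∧ ∃ b ∈ data, b % 2 = 1 ∧ a ≠ b

-- A's loop from a one-element set: true iff some odd element differs from the stored one
theorem loopA_one (data : List Int) : ∀ f : Int,
    isAnyOddLoopA data [f] = true ↔ ∃ x ∈ data, x % 2 = 1 ∧ x ≠ f := by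
  induction data with
  | nil => intro f; simp [isAnyOddLoopA]
  | cons i rest ih =>
    intro f
    by_cases hodd : i % 2 = 1
    · by_cases heq : i = f
      · simp [isAnyOddLoopA, is_even, heq, PySem.Set.add, PySem.Set.contains,
          PySem.Set.len, ih f]
      · simp [isAnyOddLoopA, is_even, heq, PySem.Set.add, PySem.Set.contains,
          PySem.Set.len, hodd]
    · simp [isAnyOddLoopA, is_even, hodd, PySem.Set.len, ih f]

-- A's loop from the empty set: true iff two distinct odd values occur
theorem loopA_char (data : List Int) :
    isAnyOddLoopA data [] = true ↔ twoOdds data := by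
  induction data with
  | nil => simp [isAnyOddLoopA, twoOdds]
  | cons i rest ih =>
    by_cases hodd : i % 2 = 1
    · rw [show isAnyOddLoopA (i :: rest) [] = isAnyOddLoopA rest [i] by
        simp [isAnyOddLoopA, is_even, hodd, PySem.Set.add, PySem.Set.contains,
          PySem.Set.len]]
      rw [loopA_one rest i]
      unfold twoOdds
      constructor
      · rintro ⟨x, hx, hox, hxi⟩
        exact ⟨i, List.mem_cons_self, hodd, x, List.mem_cons_of_mem _ hx, hox,
          fun h => hxi h.symm⟩
      · rintro ⟨a, ha, hoa, b, hb, hob, hab⟩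
        rcases List.mem_cons.mp ha with rfl | ha' <;> rcases List.mem_cons.mp hb with rfl | hb'
        · exact absurd rfl hab
        · exact ⟨b, hb', hob, fun h => hab h.symm⟩
        · exact ⟨a, ha', hoa, hab⟩
        · by_cases hai : a = i
          · exact ⟨b, hb', hob, fun h => hab (hai.trans h.symm)⟩
          · exact ⟨a, ha', hoa, hai⟩
    · rw [show isAnyOddLoopA (i :: rest) [] = isAnyOddLoopA rest [] by
        simp [isAnyOddLoopA, is_even, hodd, PySem.Set.len]]
      rw [ih]
      unfold twoOdds
      constructor
      · rintro ⟨a, ha, hoa, b, hb, hob, hab⟩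
        exact ⟨a, List.mem_cons_of_mem _ ha, hoa, b, List.mem_cons_of_mem _ hb, hob, hab⟩
      · rintro ⟨a, ha, hoa, b, hb, hob, hab⟩
        rcases List.mem_cons.mp ha with rfl | ha'
        · exact absurd hoa hodd
        rcases List.mem_cons.mp hb with rfl | hb'
        · exact absurd hob hodd
        exact ⟨a, ha', hoa, b, hb', hob, hab⟩

-- on a nonempty list, min ≠ max iff two distinct elements exist
theorem minmax_ne_iff (l : List Int) (hne : l ≠ []) :
    PySem.List.min? l (fun x => x) ≠ PySem.List.max? l (fun x => x) ↔
      ∃ a ∈ l, ∃ b ∈ l, a ≠ b := by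
  obtain ⟨m, hm⟩ := Option.ne_none_iff_exists'.mp
    (fun h => hne ((PySem.List.min?_eq_none_iff l (fun x => x)).mp h))
  obtain ⟨M, hM⟩ := Option.ne_none_iff_exists'.mp
    (fun h => hne ((PySem.List.max?_eq_none_iff l (fun x => x)).mp h))
  rw [hm, hM]
  constructor
  · intro h
    exact ⟨m, PySem.List.min?_mem hm, M, PySem.List.max?_mem hM, by
      intro e; exact h (by rw [e])⟩
  · rintro ⟨a, ha, b, hb, hab⟩ h
    have hMm : M = m := by injection h with h'; exact h'.symm
    have h1 : (fun x => x) m ≤ (fun x => x) a := PySem.List.min?_isMin hm a ha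
    have h2 : (fun x => x) a ≤ (fun x => x) M := PySem.List.max?_isMax hM a ha
    have h3 : (fun x => x) m ≤ (fun x => x) b := PySem.List.min?_isMin hm b hb
    have h4 : (fun x => x) b ≤ (fun x => x) M := PySem.List.max?_isMax hM b hb
    simp only at h1 h2 h3 h4
    omega

theorem altB_char (data : List Int) :
    is_any_odd_alt data = true ↔ twoOdds data := by
  show (!(data.filter (fun i => PySem.Int.mod i 2 != 0)).isEmpty &&
      decide (PySem.List.min? (data.filter (fun i => PySem.Int.mod i 2 != 0)) (fun x => x) ≠
        PySem.List.max? (data.filter (fun i => PySem.Int.mod i 2 != 0)) (fun x => x))) = true ↔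
      twoOdds data
  by_cases h : data.filter (fun i => PySem.Int.mod i 2 != 0) = []
  · rw [h]
    simp only [List.isEmpty_nil, Bool.not_true, Bool.false_and]
    constructor
    · intro hf; simp at hf
    rintro ⟨a, ha, hoa, _⟩
    have := List.filter_eq_nil_iff.mp h a ha
    simp [hoa] at this
  · have hne : (!(data.filter (fun i => PySem.Int.mod i 2 != 0)).isEmpty) = true := by
      simpa [List.isEmpty_iff] using h
    rw [hne, Bool.true_and, decide_eq_true_eq, minmax_ne_iff _ h]
    unfold twoOdds
    constructor
    · rintro ⟨a, ha, b, hb, hab⟩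
      rw [List.mem_filter] at ha hb
      refine ⟨a, ha.1, ?_, b, hb.1, ?_, hab⟩
      · have := ha.2; simpa using this
      · have := hb.2; simpa using this
    · rintro ⟨a, ha, hoa, b, hb, hob, hab⟩
      exact ⟨a, List.mem_filter.mpr ⟨ha, by simpa using hoa⟩,
        b, List.mem_filter.mpr ⟨hb, by simpa using hob⟩, hab⟩

-- ===== VERDICT (by name: the statement is the Claim_ definition above) =====
theorem is_any_odd_spec : Claim_equal_is_any_odd := by
  intro data _
  show is_any_odd data = is_any_odd_alt data
  have hA := loopA_char data
  have hB := altB_char data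
  unfold is_any_odd PySem.Set.empty
  cases hb : is_any_odd_alt data
  · cases ha : isAnyOddLoopA data []
    · rfl
    · exact absurd (hB.mpr (hA.mp ha)) (by simp [hb])
  · exact hA.mpr (hB.mp hb)
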